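-- pv_equiv track=rewrite | github.com/baadrdeen/Cisco_MAC_Finder-Tagging | Cisco_MAC_Finder&Tagging.py | convert_windows_mac_to_cisco
-- ===== SOURCE A (Python) =====
-- def convert_windows_mac_to_cisco(mac):
--     '''
--     Gets a MAC and converts it to
--     Cisco format
--     '''
--     char_count = 1
--     total_chars = 0
--     mac_addr = []
--
--     for char in mac.replace("-", ""):
--
--         if char_count == 4 and total_chars != 11:
--             mac_addr.append(char + ".")
--             char_count = 1
--         else:
--             mac_addr.append(char)
--             char_count += 1
--
--         total_chars += 1
--
--     mac = "".join(x for x in mac_addr)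
--
--     return mac
-- ===== SOURCE B (Python) =====
-- def convert_windows_mac_to_cisco(mac):
--     s = mac.replace("-", "")
--     if len(s) >= 8:
--         return s[:4] + "." + s[4:8] + "." + s[8:]
--     elif len(s) >= 4:
--         return s[:4] + "." + s[4:]
--     else:
--         return s
-- ===== Notes on version B (the rewrite author's own statement) =====
-- stated objective: simpler
-- what changed: Replaces the per-character loop with its char_count/total_chars counters by a closed-form slice concatenation with two length branches, inserting dots at the fixed group boundaries (slicing avoids per-character Python-level work).
import Mathlib
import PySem

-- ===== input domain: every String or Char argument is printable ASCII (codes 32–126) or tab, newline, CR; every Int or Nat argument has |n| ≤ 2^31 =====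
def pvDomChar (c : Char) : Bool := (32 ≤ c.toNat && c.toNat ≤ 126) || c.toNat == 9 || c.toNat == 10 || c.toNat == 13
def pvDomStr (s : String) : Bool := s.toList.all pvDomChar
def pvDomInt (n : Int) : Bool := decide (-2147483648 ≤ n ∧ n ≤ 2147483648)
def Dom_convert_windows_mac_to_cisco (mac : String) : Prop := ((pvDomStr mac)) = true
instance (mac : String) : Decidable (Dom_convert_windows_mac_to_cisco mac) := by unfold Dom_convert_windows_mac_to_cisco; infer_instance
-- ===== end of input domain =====

-- B replaces A's per-character loop with counters by a slice-based closed form with length branches (simpler).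


-- ===== PORT A =====
-- the for-loop over mac.replace("-",""): state = (char_count, total_chars), output built in order
def pvLoopA : List Char → Nat → Nat → List Char
  | [], _, _ => []
  | c :: rest, char_count, total_chars =>
    if char_count = 4 ∧ total_chars ≠ 11 then
      c :: '.' :: pvLoopA rest 1 (total_chars + 1)
    else
      c :: pvLoopA rest (char_count + 1) (total_chars + 1)

def convert_windows_mac_to_cisco (mac : String) : String :=
  String.ofList (pvLoopA (PySem.Str.replace mac "-" "").toList 1 0)

-- ===== PORT B =====
def convert_windows_mac_to_cisco_alt (mac : String) : String :=
  let s := (PySem.Str.replace mac "-" "").toList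
  if 8 ≤ s.length then
    String.ofList (PySem.List.slice s none (some 4) ++ ['.'] ++
                   PySem.List.slice s (some 4) (some 8) ++ ['.'] ++
                   PySem.List.slice s (some 8) none)
  else if 4 ≤ s.length then
    String.ofList (PySem.List.slice s none (some 4) ++ ['.'] ++ PySem.List.slice s (some 4) none)
  else
    String.ofList s

-- ===== PRECONDITION & SPEC =====
def Spec_convert_windows_mac_to_cisco (mac : String) (out : String) : Prop := out = convert_windows_mac_to_cisco_alt mac
instance (mac : String) (out : String) : Decidable (Spec_convert_windows_mac_to_cisco mac out) := by unfold Spec_convert_windows_mac_to_cisco; infer_instance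

-- ===== CLAIM (what is proved, stated in full; the proofs are below) =====
def Claim_equal_convert_windows_mac_to_cisco : Prop := ∀ (mac : String), Dom_convert_windows_mac_to_cisco mac → Spec_convert_windows_mac_to_cisco mac (convert_windows_mac_to_cisco mac)

-- ===== LEMMAS AND PROOFS =====

-- past index 7 the loop copies characters unchanged (char_count = total_chars - 7 never re-triggers a dot: at total_chars = 11 the guard blocks it)
theorem pvLoopA_tail (l : List Char) : ∀ (tc : Nat), 8 ≤ tc → pvLoopA l (tc - 7) tc = l := by
  induction l with
  | nil => intro tc h; rfl
  | cons c rest ih =>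
    intro tc h
    unfold pvLoopA
    rw [if_neg (by omega)]
    have : tc - 7 + 1 = (tc + 1) - 7 := by omega
    rw [this, ih (tc + 1) (by omega)]

theorem pvLoopA_key (l : List Char) :
    pvLoopA l 1 0 =
      (if 8 ≤ l.length then
        l.take 4 ++ ['.'] ++ (l.drop 4).take 4 ++ ['.'] ++ l.drop 8
      else if 4 ≤ l.length then
        l.take 4 ++ ['.'] ++ l.drop 4
      else l) := by
  rcases l with _ | ⟨a, _ | ⟨b, _ | ⟨c, _ | ⟨d, _ | ⟨e, _ | ⟨f, _ | ⟨g, _ | ⟨h, rest⟩⟩⟩⟩⟩⟩⟩⟩ <;>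
    simp [pvLoopA]
  have := pvLoopA_tail rest 8 (by omega)
  simpa using this

-- ===== VERDICT (by name: the statement is the Claim_ definition above) =====
theorem convert_windows_mac_to_cisco_spec : Claim_equal_convert_windows_mac_to_cisco := by
  intro mac _
  unfold Spec_convert_windows_mac_to_cisco convert_windows_mac_to_cisco convert_windows_mac_to_cisco_alt
  rw [pvLoopA_key]
  have h1 : ∀ (s : List Char), PySem.List.slice s none (some 4) = s.take 4 := fun s => by
    rw [PySem.List.slice_to s (by norm_num)]; rfl
  have h2 : ∀ (s : List Char), PySem.List.slice s (some 4) (some 8) = (s.drop 4).take 4 := fun s => by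
    rw [PySem.List.slice_toNat s (by norm_num) (by norm_num)]; rfl
  have h3 : ∀ (s : List Char), PySem.List.slice s (some 8) none = s.drop 8 := fun s => by
    rw [PySem.List.slice_from s (by norm_num)]; rfl
  have h4 : ∀ (s : List Char), PySem.List.slice s (some 4) none = s.drop 4 := fun s => by
    rw [PySem.List.slice_from s (by norm_num)]; rfl
  simp only [h1, h2, h3, h4]
  split_ifs <;> rfl
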